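-- pv_equiv track=rewrite | github.com/naushinyusuff/Social-Media-Sentiment-Analysis | app.py | util_func
-- ===== SOURCE A (Python) =====
-- def util_func(text):
--     n = len(text)
--     flag  = 0;
--     char = ""
--     s = []
--     for i in range(0,n):
--         if char!=text[i]:
--             flag = 1
--             char = text[i]
--             s.append(char)
--             continue
--         if char==text[i] and flag==1:
--             flag = 2
--             s.append(char)
--             continue
--         if flag==2 and char==text[i]:
--             continue
--     return "".join(s)
-- ===== SOURCE B (Python) =====
-- def util_func(text):
--     return text[:2] + "".join(c for pp, p, c in zip(text, text[1:], text[2:])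
--                               if not (pp == p == c))
-- ===== Notes on version B (the rewrite author's own statement) =====
-- stated objective: idiomatic
-- what changed: Replaces the flag/char state machine with a stateless two-character lookback: keep the first two characters and, via zip over three offset views, keep each later character unless it equals both of its two predecessors.
import Mathlib
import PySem

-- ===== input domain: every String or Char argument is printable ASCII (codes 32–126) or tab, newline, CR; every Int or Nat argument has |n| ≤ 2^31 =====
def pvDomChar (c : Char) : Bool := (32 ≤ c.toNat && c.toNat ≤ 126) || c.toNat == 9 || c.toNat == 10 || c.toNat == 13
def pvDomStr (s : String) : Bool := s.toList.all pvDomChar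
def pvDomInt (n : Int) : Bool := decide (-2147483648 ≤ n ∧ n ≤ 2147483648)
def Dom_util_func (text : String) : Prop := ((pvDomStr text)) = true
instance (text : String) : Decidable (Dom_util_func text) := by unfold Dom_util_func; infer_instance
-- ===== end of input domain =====

-- B replaces A's flag/char state machine with a stateless two-character lookback (idiomatic, same cost).

-- ===== PORT A =====
-- A's loop state: flag : Int, char : Option Char (none models Python's initial "" which
-- never equals a one-character string), s : accumulated characters.
def stepA (st : Int × Option Char × List Char) (c : Char) : Int × Option Char × List Char :=
  let (flag, ch, s) := st
  if ch ≠ some c then (1, some c, s ++ [c])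
  else if ch = some c ∧ flag = 1 then (2, ch, s ++ [c])
  else (flag, ch, s)  -- third if and fall-through both just continue

def util_func (text : String) : String :=
  String.mk (text.toList.foldl stepA (0, none, [])).2.2

-- ===== PORT B =====
-- text[:2] + "".join(c for pp, p, c in zip(text, text[1:], text[2:]) if not (pp == p == c))
def util_func_alt (text : String) : String :=
  let l := text.toList
  String.mk (l.take 2 ++
    ((l.zip (l.drop 1)).zip (l.drop 2)).filterMap
      (fun t => if t.1.1 = t.1.2 ∧ t.1.2 = t.2 then none else some t.2))

-- ===== PRECONDITION & SPEC =====
def Spec_util_func (text : String) (out : String) : Prop := out = util_func_alt text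
instance (text : String) (out : String) : Decidable (Spec_util_func text out) := by unfold Spec_util_func; infer_instance

-- ===== CLAIM (what is proved, stated in full; the proofs are below) =====
def Claim_equal_util_func : Prop := ∀ (text : String), Dom_util_func text → Spec_util_func text (util_func text)

-- ===== LEMMAS AND PROOFS =====

-- reference function: two-character context (b = "previous two chars equal"), ch = previous char
def specS (b : Bool) (ch : Option Char) : List Char → List Char
  | [] => []
  | c :: t =>
    if ch ≠ some c then c :: specS false (some c) t
    else if b then specS true ch t
    else c :: specS true (some c) t

-- triple scan as in B, with the two previous characters explicit
def tripT (pp p : Char) : List Char → List Char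
  | [] => []
  | c :: t => (if pp = p ∧ p = c then ([] : List Char) else [c]) ++ tripT p c t

def flagOf : Bool → Int
  | true => 2
  | false => 1

theorem foldlA (l : List Char) : ∀ (b : Bool) (p : Char) (acc : List Char),
    (l.foldl stepA (flagOf b, some p, acc)).2.2 = acc ++ specS b (some p) l := by
  induction l with
  | nil => intro b p acc; simp [specS]
  | cons c t ih =>
    intro b p acc
    by_cases hpc : p = c
    · subst hpc
      cases b with
      | false =>
        have h1 : stepA (flagOf false, some p, acc) p = (flagOf true, some p, acc ++ [p]) := by
          simp [stepA, flagOf]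
        calc (List.foldl stepA (flagOf false, some p, acc) (p :: t)).2.2
            = (List.foldl stepA (flagOf true, some p, acc ++ [p]) t).2.2 := by
              rw [List.foldl_cons, h1]
          _ = (acc ++ [p]) ++ specS true (some p) t := ih true p (acc ++ [p])
          _ = acc ++ specS false (some p) (p :: t) := by simp [specS]
      | true =>
        have h1 : stepA (flagOf true, some p, acc) p = (flagOf true, some p, acc) := by
          simp [stepA, flagOf]
        calc (List.foldl stepA (flagOf true, some p, acc) (p :: t)).2.2
            = (List.foldl stepA (flagOf true, some p, acc) t).2.2 := by
              rw [List.foldl_cons, h1]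
          _ = acc ++ specS true (some p) t := ih true p acc
          _ = acc ++ specS true (some p) (p :: t) := by simp [specS]
    · have hne : some p ≠ some c := by simpa using hpc
      have h1 : stepA (flagOf b, some p, acc) c = (flagOf false, some c, acc ++ [c]) := by
        simp [stepA, flagOf, hne]
      calc (List.foldl stepA (flagOf b, some p, acc) (c :: t)).2.2
          = (List.foldl stepA (flagOf false, some c, acc ++ [c]) t).2.2 := by
            rw [List.foldl_cons, h1]
        _ = (acc ++ [c]) ++ specS false (some c) t := ih false c (acc ++ [c])
        _ = acc ++ specS b (some p) (c :: t) := by simp [specS, hne]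

theorem specS_eq_tripT (t : List Char) : ∀ pp p : Char,
    specS (pp = p) (some p) t = tripT pp p t := by
  induction t with
  | nil => intro pp p; simp [specS, tripT]
  | cons c t ih =>
    intro pp p
    by_cases hpc : p = c
    · subst hpc
      by_cases hb : pp = p
      · simp [specS, tripT, hb, ← ih p p]
      · simp [specS, tripT, hb, ← ih p p]
    · have hne : some p ≠ some c := by simpa using hpc
      simp [specS, tripT, hne, hpc, ← ih p c]

theorem trip_zip (t : List Char) : ∀ pp p : Char,
    (((pp :: p :: t).zip ((pp :: p :: t).drop 1)).zip ((pp :: p :: t).drop 2)).filterMap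
      (fun x => if x.1.1 = x.1.2 ∧ x.1.2 = x.2 then none else some x.2) = tripT pp p t := by
  induction t with
  | nil => intro pp p; simp [tripT]
  | cons c t ih =>
    intro pp p
    by_cases h : pp = p ∧ p = c
    · simpa [tripT, h] using ih p c
    · simpa [tripT, h] using ih p c

-- ===== VERDICT (by name: the statement is the Claim_ definition above) =====
theorem util_func_spec : Claim_equal_util_func := by
  intro text _
  unfold Spec_util_func util_func util_func_alt
  match h : text.toList with
  | [] => simp
  | [c] => simp [stepA]
  | c1 :: c2 :: t =>
    have hA0 : stepA (0, none, []) c1 = (1, some c1, [c1]) := by simp [stepA]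
    have hB := trip_zip t c1 c2
    by_cases h12 : c1 = c2
    · subst h12
      have hA1 : stepA (1, some c1, [c1]) c1 = (2, some c1, [c1, c1]) := by simp [stepA]
      have hA : ((c1 :: c1 :: t).foldl stepA (0, none, [])).2.2
          = [c1, c1] ++ specS true (some c1) t := by
        rw [List.foldl_cons, hA0, List.foldl_cons, hA1]
        exact foldlA t true c1 [c1, c1]
      have hS : specS true (some c1) t = tripT c1 c1 t := by
        simpa using specS_eq_tripT t c1 c1
      simp only [hA, hB, hS]
      simp
    · have hne : some c1 ≠ some c2 := by simpa using h12
      have hA1 : stepA (1, some c1, [c1]) c2 = (1, some c2, [c1, c2]) := by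
        simp [stepA, hne]
      have hA : ((c1 :: c2 :: t).foldl stepA (0, none, [])).2.2
          = [c1, c2] ++ specS false (some c2) t := by
        rw [List.foldl_cons, hA0, List.foldl_cons, hA1]
        exact foldlA t false c2 [c1, c2]
      have hS : specS false (some c2) t = tripT c1 c2 t := by
        have := specS_eq_tripT t c1 c2
        simpa [h12] using this
      simp only [hA, hB, hS]
      simp
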